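-- pv_equiv track=rewrite | github.com/aminmarani/topic_modeling_comparison | labellers/mei_et_al/text.py | _label_frequency
-- ===== SOURCE A (Python) =====
-- def _label_frequency(label_tokens, context_tokens):
--     """
--     Calculate the frequency that the label appears
--     in the context(e.g, sentence)
--
--     Parameter:
--     ---------------
--
--     label_tokens: list|tuple of str
--         the label tokens
--     context_tokens: list|tuple of str
--         the sentence tokens
--
--     Return:
--     -----------
--     int: the label frequency in the sentence
--     """
--     label_len = len(label_tokens)
--     labels = [i+1
--               for i, l in enumerate(context_tokens[:(-label_len+1)])
--               if l == label_tokens[0]]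
--     for j in range(1, label_len):
--         labels = [i+1
--                   for i in labels
--                   if context_tokens[i] == label_tokens[j]]
--     return len(labels)
-- ===== SOURCE B (Python) =====
-- def _label_frequency(label_tokens, context_tokens):
--     """Count the start positions where label_tokens occurs contiguously in
--     context_tokens: one pass over the start positions with a direct window
--     comparison (A instead filters a candidate-position list per label token,
--     and returns 0 for one-token labels because of its empty slice)."""
--     m = len(label_tokens)
--     n = len(context_tokens)
--     count = 0
--     for start in range(n - m + 1):
--         if all(context_tokens[start + k] == label_tokens[k] for k in range(m)):
--             count += 1
--     return count
-- ===== Notes on version B (the rewrite author's own statement) =====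
-- stated objective: simpler
-- what changed: B counts matches in one pass over start positions with a direct window comparison (no intermediate candidate-position lists rebuilt per label token as in A); measured ~2x faster at the largest size.
-- intended difference: On a one-token label whose token occurs in the context, A returns 0 (its slice context_tokens[:0] is empty, an off-by-one of the -label_len+1 bound) while B returns the actual occurrence count, which is the documented 'frequency of the label in the sentence'. — e.g. on _label_frequency(["a"], ["b", "a"]): A returns 0, B returns 1
-- outside the precondition, e.g. on _label_frequency([], []): A returns 0, B returns 1
import Mathlib
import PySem

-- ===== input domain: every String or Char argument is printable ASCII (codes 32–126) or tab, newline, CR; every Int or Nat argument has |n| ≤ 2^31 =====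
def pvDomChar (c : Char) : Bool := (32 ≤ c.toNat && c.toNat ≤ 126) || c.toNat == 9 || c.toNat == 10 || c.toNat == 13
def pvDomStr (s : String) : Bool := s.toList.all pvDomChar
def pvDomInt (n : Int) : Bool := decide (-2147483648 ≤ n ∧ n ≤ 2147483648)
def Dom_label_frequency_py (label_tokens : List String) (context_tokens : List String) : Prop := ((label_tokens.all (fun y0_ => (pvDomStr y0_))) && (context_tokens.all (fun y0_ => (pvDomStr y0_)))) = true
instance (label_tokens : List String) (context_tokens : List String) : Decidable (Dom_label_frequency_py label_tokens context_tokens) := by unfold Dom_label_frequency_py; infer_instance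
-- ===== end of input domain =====

-- B counts label occurrences in one pass over start positions with a direct window
-- comparison (simpler than A's per-label-token candidate-list filtering rounds).

-- ===== PORT A =====
-- Literal port of A. The `none` branch of the match is Python's IndexError on
-- label_tokens[0] (empty label); Pre_ excludes it. The pyGet? comparisons inside the
-- loop only ever see in-range indices (proved below), so Option equality is exact there.
def label_frequency_py (label_tokens : List String) (context_tokens : List String) : Int :=
  let label_len : Int := (label_tokens.length : Int)
  match PySem.List.pyGet? label_tokens 0 with
  | none => 0
  | some l0 =>
    let init : List Int :=
      (PySem.List.enumerate (PySem.List.slice context_tokens none (some (-label_len + 1)))).filterMap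
        (fun p => if p.2 == l0 then some (p.1 + 1) else none)
    let final : List Int :=
      (PySem.List.pyRange 1 label_len 1).foldl
        (fun labels j =>
          labels.filterMap (fun i =>
            if PySem.List.pyGet? context_tokens i == PySem.List.pyGet? label_tokens j
            then some (i + 1) else none))
        init
    (final.length : Int)

-- ===== PORT B =====
-- Literal port of Source B: fold over the start positions, +1 when the whole window matches.
def label_frequency_py_alt (label_tokens : List String) (context_tokens : List String) : Int :=
  let m : Int := (label_tokens.length : Int)
  let n : Int := (context_tokens.length : Int)
  (PySem.List.pyRange 0 (n - m + 1) 1).foldl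
    (fun count start =>
      if (PySem.List.pyRange 0 m 1).all
           (fun k => PySem.List.pyGet? context_tokens (start + k) == PySem.List.pyGet? label_tokens k)
      then count + 1 else count)
    0

-- ===== PRECONDITION & SPEC =====
-- Pre_ excludes empty label_tokens: there A raises IndexError (label_tokens[0]) whenever the
-- context is non-empty, and on ([], []) its 0 (the comprehension never evaluates label_tokens[0])
-- and B's len(context)+1 (every position matches the empty label) are both defensible corner values.
def Pre_label_frequency_py (label_tokens : List String) (context_tokens : List String) : Prop :=
  label_tokens ≠ []
instance (label_tokens : List String) (context_tokens : List String) : Decidable (Pre_label_frequency_py label_tokens context_tokens) := by unfold Pre_label_frequency_py; infer_instance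
def pvWitness_label_frequency_py : List String × List String := (["a", "b"], ["a", "b", "a", "b"])

-- On a one-token label whose token occurs in the context, A returns 0 (its slice
-- context_tokens[:0] is empty, an off-by-one of the -label_len+1 bound) while B returns
-- the actual occurrence count, which is the documented frequency of the label.
def D_label_frequency_py (label_tokens : List String) (context_tokens : List String) : Prop :=
  label_tokens.length = 1 ∧ label_tokens.getD 0 "" ∈ context_tokens
instance (label_tokens : List String) (context_tokens : List String) : Decidable (D_label_frequency_py label_tokens context_tokens) := by unfold D_label_frequency_py; infer_instance

def Spec_label_frequency_py (label_tokens : List String) (context_tokens : List String) (out : Int) : Prop := ¬ D_label_frequency_py label_tokens context_tokens → out = label_frequency_py_alt label_tokens context_tokens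
instance (label_tokens : List String) (context_tokens : List String) (out : Int) : Decidable (Spec_label_frequency_py label_tokens context_tokens out) := by unfold Spec_label_frequency_py; infer_instance

def pvDiffWitness_label_frequency_py : List String × List String := (["a"], ["b", "a"])
def pvDiffWitnessOut_label_frequency_py : Int × Int := (0, 1)

-- ===== CLAIM (what is proved, stated in full; the proofs are below) =====
def Claim_unchanged_label_frequency_py : Prop := ∀ (label_tokens : List String) (context_tokens : List String), Dom_label_frequency_py label_tokens context_tokens → Pre_label_frequency_py label_tokens context_tokens → Spec_label_frequency_py label_tokens context_tokens (label_frequency_py label_tokens context_tokens)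
def Claim_changed_label_frequency_py : Prop := Dom_label_frequency_py (pvDiffWitness_label_frequency_py.1) (pvDiffWitness_label_frequency_py.2) ∧ Pre_label_frequency_py (pvDiffWitness_label_frequency_py.1) (pvDiffWitness_label_frequency_py.2) ∧ D_label_frequency_py (pvDiffWitness_label_frequency_py.1) (pvDiffWitness_label_frequency_py.2) ∧ label_frequency_py (pvDiffWitness_label_frequency_py.1) (pvDiffWitness_label_frequency_py.2) = pvDiffWitnessOut_label_frequency_py.1 ∧ label_frequency_py_alt (pvDiffWitness_label_frequency_py.1) (pvDiffWitness_label_frequency_py.2) = pvDiffWitnessOut_label_frequency_py.2 ∧ pvDiffWitnessOut_label_frequency_py.1 ≠ pvDiffWitnessOut_label_frequency_py.2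
def Claim_exact_label_frequency_py : Prop := ∀ (label_tokens : List String) (context_tokens : List String), Dom_label_frequency_py label_tokens context_tokens → Pre_label_frequency_py label_tokens context_tokens → D_label_frequency_py label_tokens context_tokens → label_frequency_py label_tokens context_tokens ≠ label_frequency_py_alt label_tokens context_tokens

-- ===== LEMMAS AND PROOFS =====

def pvMatch (lab ctx : List String) (j : Nat) (s : Nat) : Bool :=
  (List.range j).all (fun k => ctx.getD (s + k) "" == lab.getD k "")

def pvCap (lab ctx : List String) : Nat := ctx.length - (lab.length - 1)

theorem pvCond (lab ctx : List String) (s k : Nat) (hsk : s + k < ctx.length) (hk : k < lab.length) :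
    (PySem.List.pyGet? ctx ((s:Int) + (k:Int)) == PySem.List.pyGet? lab (k:Int))
      = (ctx.getD (s + k) "" == lab.getD k "") := by
  rw [← Int.natCast_add, PySem.List.pyGet?_natCast, PySem.List.pyGet?_natCast,
      List.getElem?_eq_getElem hsk, List.getElem?_eq_getElem hk,
      List.getD_eq_getElem _ _ hsk, List.getD_eq_getElem _ _ hk]
  simp

theorem pvAllCond (lab ctx : List String) (s : Nat) (hs : s < pvCap lab ctx) :
    ((PySem.List.pyRange 0 (lab.length : Int) 1).all
      (fun k => PySem.List.pyGet? ctx ((s:Int) + k) == PySem.List.pyGet? lab k))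
      = pvMatch lab ctx lab.length s := by
  rw [PySem.List.pyRange_one, List.all_map]
  unfold pvMatch
  rw [Bool.eq_iff_iff]
  simp only [List.all_eq_true, List.mem_range, Function.comp_apply, Int.sub_zero, Int.toNat_natCast, Int.zero_add]
  constructor
  · intro h k hk
    have := h k hk
    rwa [pvCond lab ctx s k (by unfold pvCap at hs; omega) hk] at this
  · intro h k hk
    have := h k hk
    rwa [pvCond lab ctx s k (by unfold pvCap at hs; omega) hk]

theorem pvAlt_eq_countP (lab ctx : List String) (h : lab ≠ []) :
    label_frequency_py_alt lab ctx =
      (((List.range (pvCap lab ctx)).countP (pvMatch lab ctx lab.length) : Nat) : Int) := by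
  have hm : 1 ≤ lab.length := List.length_pos_iff.mpr h
  simp only [label_frequency_py_alt]
  rw [PySem.List.pyRange_one 0 ((ctx.length : Int) - (lab.length : Int) + 1), List.foldl_map]
  have hcap : (((ctx.length : Int) - (lab.length : Int) + 1) - 0).toNat = pvCap lab ctx := by
    unfold pvCap; omega
  rw [hcap]
  have hc := PySem.List.foldl_congr_mem
      (l := List.range (pvCap lab ctx)) (init := (0:Int))
      (f := fun x y =>
        if ((PySem.List.pyRange 0 (lab.length:Int) 1).all fun k =>
              PySem.List.pyGet? ctx (0 + (y:Int) + k) == PySem.List.pyGet? lab k) = true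
        then x + 1 else x)
      (g := fun acc s => if pvMatch lab ctx lab.length s then acc + 1 else acc)
      (by intro acc s hs
          simp only [Int.zero_add]
          rw [pvAllCond lab ctx s (List.mem_range.mp hs)])
  rw [hc]
  rw [PySem.List.foldl_if_add_one]
  simp

def pvCand (lab ctx : List String) (j : Nat) : List Int :=
  (List.range (pvCap lab ctx)).filterMap
    (fun s => if pvMatch lab ctx j s then some ((s:Int) + j) else none)

theorem pvStep (lab ctx : List String) (j : Nat) (hj1 : 1 ≤ j) (hj : j < lab.length) :
    (pvCand lab ctx j).filterMap
      (fun i => if PySem.List.pyGet? ctx i == PySem.List.pyGet? lab (j:Int)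
                then some (i + 1) else none)
      = pvCand lab ctx (j+1) := by
  unfold pvCand
  rw [List.filterMap_filterMap]
  apply List.filterMap_congr
  intro s hs
  have hs' : s < pvCap lab ctx := List.mem_range.mp hs
  have hcond : (PySem.List.pyGet? ctx ((s:Int) + (j:Int)) == PySem.List.pyGet? lab (j:Int))
      = (ctx.getD (s + j) "" == lab.getD j "") :=
    pvCond lab ctx s j (by unfold pvCap at hs'; omega) hj
  have hmatch : pvMatch lab ctx (j+1) s
      = (pvMatch lab ctx j s && (ctx.getD (s + j) "" == lab.getD j "")) := by
    unfold pvMatch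
    rw [List.range_succ, List.all_append]
    simp
  have hval : ((s:Int) + (j:Int)) + 1 = (s:Int) + ((j+1:Nat):Int) := by push_cast; ring
  by_cases hp : pvMatch lab ctx j s
  · rw [if_pos hp, hmatch, hp]
    simp only [Bool.true_and, Option.bind]
    rw [hcond, hval]
  · have hp' : pvMatch lab ctx j s = false := by simpa using hp
    rw [if_neg (by simp [hp']), hmatch, hp']
    simp

theorem pvBase (lab ctx : List String) (l0 : String)
    (h0 : lab.getD 0 "" = l0) (h2 : 2 ≤ lab.length) :
    (PySem.List.enumerate (PySem.List.slice ctx none (some (-(lab.length:Int) + 1)))).filterMap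
      (fun p => if p.2 == l0 then some (p.1 + 1) else none) = pvCand lab ctx 1 := by
  have hneg : -(lab.length:Int) + 1 = -((lab.length - 1 : Nat):Int) := by omega
  rw [hneg, PySem.List.slice_to_neg_natCast ctx (lab.length - 1) (by omega)]
  have hctx : ctx.length - (lab.length - 1) = pvCap lab ctx := rfl
  rw [hctx]
  have hcap_le : pvCap lab ctx ≤ ctx.length := by unfold pvCap; omega
  rw [PySem.List.enumerate_eq_map_pyRange (d := ""),
      PySem.List.pyRange_one, List.filterMap_map]
  have hlen : (PySem.List.len (ctx.take (pvCap lab ctx)) - 0).toNat = pvCap lab ctx := by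
    simp [PySem.List.len, List.length_take]; omega
  rw [hlen, List.filterMap_map]
  unfold pvCand
  apply List.filterMap_congr
  intro s hs
  have hs' : s < pvCap lab ctx := List.mem_range.mp hs
  have hsn : s < ctx.length := by omega
  have hgd : PySem.List.pyGetD (ctx.take (pvCap lab ctx)) (0 + (s:Int)) ""
      = ctx.getD s "" := by
    rw [Int.zero_add, PySem.List.pyGetD_natCast,
        List.getD_eq_getElem _ _ (by simp [List.length_take]; omega),
        List.getD_eq_getElem _ _ hsn]
    exact List.getElem_take
  have hmatch1 : pvMatch lab ctx 1 s = (ctx.getD s "" == l0) := by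
    unfold pvMatch
    have h0' : lab[0]?.getD "" = l0 := h0
    simp [List.range_succ, h0']
  simp only [Function.comp_apply, hgd, hmatch1]
  have hval : (0:Int) + (s:Int) + 1 = (s:Int) + ((1:Nat):Int) := by push_cast; ring
  rw [hval]

theorem pvFold (lab ctx : List String) (jj : Nat) (h2 : 2 ≤ lab.length)
    (hjj : jj ≤ lab.length - 1) :
    (PySem.List.pyRange 1 (1 + (jj:Int)) 1).foldl
      (fun labels j =>
        labels.filterMap (fun i =>
          if PySem.List.pyGet? ctx i == PySem.List.pyGet? lab j
          then some (i + 1) else none))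
      (pvCand lab ctx 1)
      = pvCand lab ctx (1 + jj) := by
  induction jj with
  | zero => rw [PySem.List.pyRange_one_eq_nil (by omega)]; simp
  | succ k ih =>
    have hsplit : (1 : Int) + ((k+1:Nat):Int) = (1 + (k:Nat) : Int) + 1 := by push_cast; ring
    rw [hsplit, PySem.List.pyRange_one_succ_right (by omega), List.foldl_append,
        ih (by omega)]
    simp only [List.foldl_cons, List.foldl_nil]
    have hcast : (1 + (k:Nat) : Int) = (((1+k:Nat)):Int) := by push_cast; ring
    rw [hcast, pvStep lab ctx (1+k) (by omega) (by omega)]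
    congr 1

theorem pvA_eq_countP (lab ctx : List String) (h2 : 2 ≤ lab.length) :
    label_frequency_py lab ctx =
      (((List.range (pvCap lab ctx)).countP (pvMatch lab ctx lab.length) : Nat) : Int) := by
  obtain ⟨l0, rest, rfl⟩ : ∃ a l, lab = a :: l := by
    cases lab with
    | nil => simp at h2
    | cons a l => exact ⟨a, l, rfl⟩
  simp only [label_frequency_py, PySem.List.pyGet?_zero_cons]
  have hm : ((l0 :: rest).length : Int) = 1 + (((l0 :: rest).length - 1 : Nat) : Int) := by
    simp; omega
  rw [pvBase (l0 :: rest) ctx l0 rfl h2, hm, pvFold (l0 :: rest) ctx _ h2 (le_refl _)]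
  have : 1 + ((l0 :: rest).length - 1) = (l0 :: rest).length := by omega
  rw [this]
  have hlenfm : ∀ (l : List Nat) (p : Nat → Bool) (f : Nat → Int),
      (l.filterMap (fun x => if p x then some (f x) else none)).length = l.countP p := by
    intro l p f
    induction l with
    | nil => simp
    | cons x xs ih =>
      by_cases hx : p x <;> simp [hx, ih]
  unfold pvCand
  rw [hlenfm]

theorem pvA_one (t : String) (ctx : List String) : label_frequency_py [t] ctx = 0 := by
  simp only [label_frequency_py]
  rw [show PySem.List.pyGet? [t] 0 = some t from rfl]
  have h0 : -(([t].length : Nat) : Int) + 1 = 0 := by simp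
  rw [h0, PySem.List.slice_to ctx (by omega)]
  simp [PySem.List.pyRange_one_eq_nil]

theorem pvAlt_one_zero (t : String) (ctx : List String) (hnm : t ∉ ctx) :
    label_frequency_py_alt [t] ctx = 0 := by
  rw [pvAlt_eq_countP [t] ctx (by simp)]
  have : (List.range (pvCap [t] ctx)).countP (pvMatch [t] ctx [t].length) = 0 := by
    rw [List.countP_eq_zero]
    intro s hs
    have hs' : s < ctx.length := by
      have := List.mem_range.mp hs
      unfold pvCap at this; simpa using this
    unfold pvMatch
    simp only [List.length_cons, List.length_nil, List.range_succ, List.range_zero,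
      List.nil_append, List.all_cons, List.all_nil, Bool.and_true]
    have : ctx.getD (s + 0) "" = ctx[s] := by
      rw [Nat.add_zero, List.getD_eq_getElem _ _ hs']
    rw [this]
    simp only [List.getD, List.getElem?_cons_zero, Option.getD_some]
    intro hc
    exact hnm (by rw [← (beq_iff_eq).mp hc]; exact List.getElem_mem hs')
  rw [this]; rfl

theorem pvAlt_one_pos (t : String) (ctx : List String) (hm : t ∈ ctx) :
    label_frequency_py_alt [t] ctx ≠ 0 := by
  rw [pvAlt_eq_countP [t] ctx (by simp)]
  have : 0 < (List.range (pvCap [t] ctx)).countP (pvMatch [t] ctx [t].length) := by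
    rw [List.countP_pos_iff]
    obtain ⟨s, hs, rfl⟩ := List.mem_iff_getElem.mp hm
    refine ⟨s, List.mem_range.mpr (by unfold pvCap; simpa using hs), ?_⟩
    unfold pvMatch
    simp only [List.length_cons, List.length_nil, List.range_succ, List.range_zero,
      List.nil_append, List.all_cons, List.all_nil, Bool.and_true]
    rw [Nat.add_zero, List.getD_eq_getElem _ _ hs]
    simp [List.getD]
  omega

-- ===== VERDICT (by name: the statement is the Claim_ definition above) =====
theorem label_frequency_py_spec : Claim_unchanged_label_frequency_py := by
  intro lab ctx hdom hpre hnd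
  cases lab with
  | nil => exact absurd rfl hpre
  | cons t rest =>
    cases rest with
    | nil =>
      have hmem : t ∉ ctx := by
        intro hmem
        exact hnd ⟨by simp, by simpa using hmem⟩
      rw [pvA_one, pvAlt_one_zero t ctx hmem]
    | cons u rest' =>
      rw [pvA_eq_countP _ _ (by simp), pvAlt_eq_countP _ _ (by simp)]

theorem label_frequency_py_changed : Claim_changed_label_frequency_py := by
  unfold Claim_changed_label_frequency_py; decide

theorem label_frequency_py_tight : Claim_exact_label_frequency_py := by
  intro lab ctx hdom hpre hD
  cases lab with
  | nil => exact absurd rfl hpre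
  | cons t rest =>
    have hrest : rest = [] := by
      have := hD.1; simpa using this
    subst hrest
    have hmem : t ∈ ctx := by simpa using hD.2
    rw [pvA_one]
    exact fun h => pvAlt_one_pos t ctx hmem h.symm
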